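-- pv_equiv track=rewrite | github.com/AndreasZachariae/semantic_hierarchical_graph | semantic_hierarchical_graph/node.py | _compare_hierarchy
-- ===== SOURCE A (Python) =====
-- from typing import List, TypeVar, Generic, Optional, Union
--
-- def _compare_hierarchy(hierarchy_1: List[str], hierarchy_2: List[str]) -> List[bool]:
--     hierarchy_mask = []
--     different_branch = False
--     for start, goal in zip(hierarchy_1, hierarchy_2):
--         if start != goal or different_branch:
--             hierarchy_mask.append(False)
--             different_branch = True
--         else:
--             hierarchy_mask.append(True)
--
--     return hierarchy_mask
-- ===== SOURCE B (Python) =====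
-- def _compare_hierarchy(hierarchy_1, hierarchy_2):
--     pairs = list(zip(hierarchy_1, hierarchy_2))
--     n = len(pairs)
--     k = next((i for i, (s, g) in enumerate(pairs) if s != g), n)
--     return [True] * k + [False] * (n - k)
-- ===== Notes on version B (the rewrite author's own statement) =====
-- stated objective: simpler
-- what changed: Instead of a per-element loop tracking a different_branch flag and appending booleans one by one, B locates the first mismatching index k in the zipped prefix and builds the result as two homogeneous blocks [True]*k + [False]*(n-k).
import Mathlib
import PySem

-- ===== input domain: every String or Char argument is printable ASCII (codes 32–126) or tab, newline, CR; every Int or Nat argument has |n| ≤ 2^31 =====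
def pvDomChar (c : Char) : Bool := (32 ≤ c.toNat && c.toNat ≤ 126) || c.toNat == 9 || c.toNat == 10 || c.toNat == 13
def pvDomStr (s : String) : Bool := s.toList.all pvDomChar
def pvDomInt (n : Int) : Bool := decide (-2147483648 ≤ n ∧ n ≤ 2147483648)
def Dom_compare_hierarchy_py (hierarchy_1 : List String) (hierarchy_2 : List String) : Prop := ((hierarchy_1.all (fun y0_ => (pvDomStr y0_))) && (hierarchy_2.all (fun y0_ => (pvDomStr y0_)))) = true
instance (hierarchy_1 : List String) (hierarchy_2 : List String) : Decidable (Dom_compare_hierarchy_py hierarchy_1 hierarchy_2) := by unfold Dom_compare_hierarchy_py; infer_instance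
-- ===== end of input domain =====

-- B replaces A's per-element different_branch flag loop by "find the first mismatch index, then
-- emit two homogeneous blocks" (objective: simpler decomposition; same O(n) cost).

-- ===== PORT A =====
-- the for-loop over zip(h1,h2) with the mutable different_branch flag, appending per element
def compare_hierarchy_py_loop : List (String × String) → Bool → List Bool
  | [], _ => []
  | (start, goal) :: rest, different_branch =>
      if start ≠ goal || different_branch then
        false :: compare_hierarchy_py_loop rest true
      else
        true :: compare_hierarchy_py_loop rest different_branch

def compare_hierarchy_py (hierarchy_1 : List String) (hierarchy_2 : List String) : List Bool :=
  compare_hierarchy_py_loop (hierarchy_1.zip hierarchy_2) false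

-- ===== PORT B =====
def compare_hierarchy_py_alt (hierarchy_1 : List String) (hierarchy_2 : List String) : List Bool :=
  let pairs := hierarchy_1.zip hierarchy_2
  let n := pairs.length
  let k := match pairs.findIdx? (fun p => p.1 ≠ p.2) with
           | some i => i
           | none => n
  List.replicate k true ++ List.replicate (n - k) false

-- ===== PRECONDITION & SPEC =====
def Spec_compare_hierarchy_py (hierarchy_1 : List String) (hierarchy_2 : List String) (out : List Bool) : Prop := out = compare_hierarchy_py_alt hierarchy_1 hierarchy_2
instance (hierarchy_1 : List String) (hierarchy_2 : List String) (out : List Bool) : Decidable (Spec_compare_hierarchy_py hierarchy_1 hierarchy_2 out) := by unfold Spec_compare_hierarchy_py; infer_instance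

-- ===== CLAIM (what is proved, stated in full; the proofs are below) =====
def Claim_equal_compare_hierarchy_py : Prop := ∀ (hierarchy_1 : List String) (hierarchy_2 : List String), Dom_compare_hierarchy_py hierarchy_1 hierarchy_2 → Spec_compare_hierarchy_py hierarchy_1 hierarchy_2 (compare_hierarchy_py hierarchy_1 hierarchy_2)

-- ===== LEMMAS AND PROOFS =====

-- once the flag is set, the loop emits only False
theorem compare_hierarchy_py_loop_true (ps : List (String × String)) :
    compare_hierarchy_py_loop ps true = List.replicate ps.length false := by
  induction ps with
  | nil => rfl
  | cons p rest ih =>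
      obtain ⟨s, g⟩ := p
      simp [compare_hierarchy_py_loop, ih, List.replicate_succ]

-- the flag-off loop equals "True until the first mismatch, then False"
theorem compare_hierarchy_py_loop_false (ps : List (String × String)) :
    compare_hierarchy_py_loop ps false =
      (match ps.findIdx? (fun p => p.1 ≠ p.2) with
       | some i => List.replicate i true ++ List.replicate (ps.length - i) false
       | none => List.replicate ps.length true) := by
  induction ps with
  | nil => rfl
  | cons p rest ih =>
      obtain ⟨s, g⟩ := p
      by_cases h : s = g
      · simp only [compare_hierarchy_py_loop, h, ne_eq, not_true_eq_false, decide_false,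
          Bool.false_or, if_false, List.findIdx?_cons, Bool.false_eq_true, ih]
        cases hf : rest.findIdx? (fun p => p.1 ≠ p.2) with
        | none => simp [List.replicate_succ]
        | some i => simp [List.replicate_succ]
      · simp only [compare_hierarchy_py_loop, h, ne_eq, not_false_eq_true, decide_true,
          Bool.true_or, if_true, List.findIdx?_cons, decide_true,
          compare_hierarchy_py_loop_true]
        simp [List.replicate_succ]

-- ===== VERDICT (by name: the statement is the Claim_ definition above) =====
theorem compare_hierarchy_py_spec : Claim_equal_compare_hierarchy_py := by
  intro h1 h2 _
  unfold Spec_compare_hierarchy_py compare_hierarchy_py compare_hierarchy_py_alt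
  rw [compare_hierarchy_py_loop_false]
  simp only [ne_eq]
  cases hf : (h1.zip h2).findIdx? (fun p => !decide (p.1 = p.2)) with
  | none => simp [hf]
  | some i => simp [hf]
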